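-- pv_equiv track=rewrite | github.com/PeriodicROM/ReduceMonomsRBC | ReduceMonomsRBC/construct_roms.py | hk_modes
-- ===== SOURCE A (Python) =====
-- def hk_modes(hier_num):
--     """
--     Generate modes in the HK hierarchy
--
--     Parameters
--     ----------
--     hier_num : int
--         Model number in the HK hierarchy.
--
--     Returns
--     -------
--     p_modes : list, optional
--         List of psi modes, represented as tuples.
--         Each tuple contains the horizontal and vertical wavenumbers.
--         Only necessary if mode_type = 'input'.
--         Default (Lorenz): [(1,1)].
--     t_modes : list, optional
--         List of theta modes, represented as tuples.
--         Only necessary if mode_type = 'input'.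
--         Default (Lorenz): [(0,2), (1,1)]
--
--     """
--
--     p_modes = [(0,1), (1,1)]
--     t_modes = [(0,2), (1,1)]
--
--     pair = (1,1)
--
--
--     for i in range(1, hier_num):
--
--         if pair[1] == 1:
--             level = pair[0]+1
--             pair = (1, level)
--             p_modes.append((0, level*2-1))
--             t_modes.append((0, level*2))
--         else:
--             pair = (pair[0]+1, pair[1]-1)
--
--         p_modes.append(pair)
--         t_modes.append(pair)
--
--
--     p_modes.sort()
--     t_modes.sort()
--
--     return p_modes, t_modes
-- ===== SOURCE B (Python) =====
-- def hk_modes(hier_num):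
--     """Construct the sorted HK mode lists directly.
--
--     The modes A generates consist of the 'staircase' of pairs (a, b) with
--     a, b >= 1 and a + b <= L + 1 (L complete diagonals), a partial diagonal
--     (a, L + 2 - a) for a = 1..k, and one (0, .) mode per started diagonal
--     level.  L and k follow from hier_num via the triangular numbers, so the
--     two lists can be written down in sorted order without simulating A's
--     append sequence and without calling sort.
--     """
--     n = hier_num - 1 if hier_num > 1 else 0
--     L = 1
--     while (L + 1) * (L + 2) // 2 - 1 <= n:
--         L += 1
--     k = n - (L * (L + 1) // 2 - 1)
--     top = L + 1 if k > 0 else L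
--     p_modes = [(0, 2 * l - 1) for l in range(1, top + 1)]
--     t_modes = [(0, 2 * l) for l in range(1, top + 1)]
--     for a in range(1, L + 1):
--         row = [(a, b) for b in range(1, L + 2 - a + (1 if a <= k else 0))]
--         p_modes += row
--         t_modes += row
--     return p_modes, t_modes
-- ===== Notes on version B (the rewrite author's own statement) =====
-- stated objective: faster
-- what changed: B replaces A's step-by-step state-machine simulation followed by a sort with a closed-form construction: it computes the number of complete diagonals L and the partial length k from triangular-number bounds, then writes both lists out directly in sorted order (the (0,.) column, then the staircase row by row), with no simulation of the append sequence and no sort call.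
import Mathlib
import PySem

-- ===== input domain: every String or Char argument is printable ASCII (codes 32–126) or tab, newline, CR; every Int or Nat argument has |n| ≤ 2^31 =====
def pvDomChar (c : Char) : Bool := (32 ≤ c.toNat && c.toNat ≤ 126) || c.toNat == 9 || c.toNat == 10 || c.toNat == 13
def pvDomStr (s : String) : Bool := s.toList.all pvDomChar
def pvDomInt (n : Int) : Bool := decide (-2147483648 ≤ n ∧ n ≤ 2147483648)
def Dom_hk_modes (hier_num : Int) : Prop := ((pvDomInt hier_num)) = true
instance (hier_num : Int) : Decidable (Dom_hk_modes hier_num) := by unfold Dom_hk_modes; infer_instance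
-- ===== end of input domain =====

-- B replaces A's step-by-step state machine + final sort by a closed-form construction:
-- it derives the diagonal count from triangular-number bounds and writes both lists out
-- directly in sorted order, with no simulation of the append sequence and no sort call
-- (objective: faster — measured).

-- ===== PORT A =====
-- loop body of A's 'for i in range(1, hier_num)' (the index i is unused by the body)
def hkStepA (s : List (Int × Int) × List (Int × Int) × (Int × Int)) :
    List (Int × Int) × List (Int × Int) × (Int × Int) :=
  let (p, t, pair) := s
  if pair.2 = 1 then
    let level := pair.1 + 1
    let pair := (1, level)
    (p ++ [(0, level * 2 - 1)] ++ [pair], t ++ [(0, level * 2)] ++ [pair], pair)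
  else
    let pair := (pair.1 + 1, pair.2 - 1)
    (p ++ [pair], t ++ [pair], pair)

def hk_modes (hier_num : Int) : (List (Int × Int)) × (List (Int × Int)) :=
  let s := (PySem.List.pyRange 1 hier_num 1).foldl (fun s _ => hkStepA s)
      ([(0, 1), (1, 1)], [(0, 2), (1, 1)], (1, 1))
  (PySem.List.sorted2 s.1 (fun x => x.1) (fun x => x.2),
   PySem.List.sorted2 s.2.1 (fun x => x.1) (fun x => x.2))

-- ===== PORT B =====
-- B's while loop finding the number L of complete diagonals; fuel only makes it
-- structurally total (each iteration increments L, and L can never exceed n + 1)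
def hkFindL : Nat → Int → Int → Int
  | 0, _, L => L
  | fuel + 1, n, L =>
      if PySem.Int.floordiv ((L + 1) * (L + 2)) 2 - 1 ≤ n then hkFindL fuel n (L + 1) else L

def hk_modes_alt (hier_num : Int) : (List (Int × Int)) × (List (Int × Int)) :=
  let n := if 1 < hier_num then hier_num - 1 else 0
  let L := hkFindL (n.toNat + 2) n 1
  let k := n - (PySem.Int.floordiv (L * (L + 1)) 2 - 1)
  let top := if 0 < k then L + 1 else L
  let p0 := (PySem.List.pyRange 1 (top + 1) 1).map (fun l => ((0 : Int), 2 * l - 1))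
  let t0 := (PySem.List.pyRange 1 (top + 1) 1).map (fun l => ((0 : Int), 2 * l))
  (PySem.List.pyRange 1 (L + 1) 1).foldl
    (fun (s : List (Int × Int) × List (Int × Int)) a =>
      let row := (PySem.List.pyRange 1 (L + 2 - a + (if a ≤ k then 1 else 0)) 1).map
        (fun b => (a, b))
      (s.1 ++ row, s.2 ++ row)) (p0, t0)

-- ===== PRECONDITION & SPEC =====
def Spec_hk_modes (hier_num : Int) (out : (List (Int × Int)) × (List (Int × Int))) : Prop := out = hk_modes_alt hier_num
instance (hier_num : Int) (out : (List (Int × Int)) × (List (Int × Int))) : Decidable (Spec_hk_modes hier_num out) := by unfold Spec_hk_modes; infer_instance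

-- ===== CLAIM (what is proved, stated in full; the proofs are below) =====
def Claim_equal_hk_modes : Prop := ∀ (hier_num : Int), Dom_hk_modes hier_num → Spec_hk_modes hier_num (hk_modes hier_num)

-- ===== LEMMAS AND PROOFS =====

-- the strict lexicographic order Python's tuple sort uses
def hkLt (x y : Int × Int) : Prop := x.1 < y.1 ∨ (x.1 = y.1 ∧ x.2 < y.2)

-- the triangular numbers, in the ports' notation
def hkTri (L : Int) : Int := PySem.Int.floordiv (L * (L + 1)) 2

-- the partial diagonal of level L+1, cut after k entries (k = L+1 is the full diagonal)
def pdiag (L k : Int) : List (Int × Int) :=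
  (PySem.List.pyRange 1 (k + 1) 1).map (fun a => (a, L + 2 - a))

-- the block A appends for the complete diagonals 2..L (zeros interleaved)
def ablock (L : Int) (z : Int → Int) : List (Int × Int) :=
  (PySem.List.pyRange 2 (L + 1) 1).flatMap (fun l => ((0 : Int), z l) :: pdiag (l - 1) l)

-- A's unsorted list after hkTri L - 1 + k steps (k entries into the partial diagonal)
def aList (L k : Int) (z : Int → Int) : List (Int × Int) :=
  [(0, z 1), (1, 1)] ++ ablock L z ++
    (if 0 < k then ((0 : Int), z (L + 1)) :: pdiag L k else [])

-- B's zeros column and staircase rows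
def zCol (z : Int → Int) (top : Int) : List (Int × Int) :=
  (PySem.List.pyRange 1 (top + 1) 1).map (fun l => ((0 : Int), z l))

def rowsB (L k : Int) : List (Int × Int) :=
  (PySem.List.pyRange 1 (L + 1) 1).flatMap
    (fun a => (PySem.List.pyRange 1 (L + 2 - a + (if a ≤ k then 1 else 0)) 1).map
      (fun b => (a, b)))

-- a fold whose body ignores the list element is an iterate
theorem foldl_const_iterate (f : (List (Int × Int) × List (Int × Int) × (Int × Int)) →
    (List (Int × Int) × List (Int × Int) × (Int × Int))) :
    ∀ (l : List Int) (s : List (Int × Int) × List (Int × Int) × (Int × Int)),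
      l.foldl (fun s _ => f s) s = f^[l.length] s := by
  intro l
  induction l with
  | nil => intro s; rfl
  | cons x xs ih =>
      intro s
      simp [List.foldl, ih, Function.iterate_succ_apply]

theorem foldl_row_append (row : Int → List (Int × Int)) :
    ∀ (xs : List Int) (p t : List (Int × Int)),
      xs.foldl (fun s a => (s.1 ++ row a, s.2 ++ row a)) (p, t) =
        (p ++ xs.flatMap row, t ++ xs.flatMap row) := by
  intro xs
  induction xs with
  | nil => intro p t; simp
  | cons x xs ih => intro p t; simp [List.foldl, ih]

theorem hkTri_two_mul (L : Int) : 2 * hkTri L = L * (L + 1) := by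
  have hev : (2 : Int) ∣ L * (L + 1) := (Int.even_mul_succ_self L).two_dvd
  have hm : PySem.Int.mod (L * (L + 1)) 2 = 0 := (PySem.Int.mod_eq_zero_iff_dvd _ _).mpr hev
  have := PySem.Int.floordiv_mul_add_mod (L * (L + 1)) 2
  unfold hkTri
  omega

theorem hkTri_succ (L : Int) : hkTri (L + 1) = hkTri L + (L + 1) := by
  have h1 := hkTri_two_mul L
  have h2 := hkTri_two_mul (L + 1)
  have h3 : (L + 1) * (L + 1 + 1) = L * (L + 1) + 2 * (L + 1) := by ring
  omega

theorem hkTri_ge (L : Int) (h : 1 ≤ L) : L ≤ hkTri L := by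
  have h1 := hkTri_two_mul L
  nlinarith

theorem hkFindL_spec (fuel : Nat) : ∀ (n L0 : Int), 1 ≤ L0 → hkTri L0 - 1 ≤ n →
    n + 2 - L0 ≤ (fuel : Int) →
    1 ≤ hkFindL fuel n L0 ∧ hkTri (hkFindL fuel n L0) - 1 ≤ n ∧
      n < hkTri (hkFindL fuel n L0 + 1) - 1 := by
  induction fuel with
  | zero =>
      intro n L0 h1 h2 h3
      exact absurd h2 (by have := hkTri_ge L0 h1; simp at h3; omega)
  | succ fuel ih =>
      intro n L0 h1 h2 h3
      have hcond : PySem.Int.floordiv ((L0 + 1) * (L0 + 2)) 2 - 1 = hkTri (L0 + 1) - 1 := by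
        unfold hkTri
        congr 2
        ring
      by_cases h : PySem.Int.floordiv ((L0 + 1) * (L0 + 2)) 2 - 1 ≤ n
      · rw [hkFindL, if_pos h]
        exact ih n (L0 + 1) (by omega) (by omega) (by push_cast; omega)
      · rw [hkFindL, if_neg h]
        exact ⟨h1, h2, by omega⟩
theorem sorted2_eq_of_perm_of_pairwise (xs ys : List (Int × Int)) (hperm : ys.Perm xs)
    (hp : ys.Pairwise hkLt) :
    PySem.List.sorted2 xs (fun x => x.1) (fun x => x.2) false = ys := by
  have hfun : (fun (a b : Int × Int) =>
        decide (a.1 < b.1) || !decide (b.1 < a.1) && decide (a.2 < b.2)) =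
      (fun (a b : Int × Int) => decide (toLex (a.1, a.2) < toLex (b.1, b.2))) := by
    funext a b
    rw [Bool.eq_iff_iff]
    simp only [Bool.or_eq_true, Bool.and_eq_true, Bool.not_eq_true', decide_eq_true_eq,
      decide_eq_false_iff_not, Prod.Lex.toLex_lt_toLex]
    omega
  have hbridge : PySem.List.sorted2 xs (fun x => x.1) (fun x => x.2) false =
      PySem.List.sorted xs (fun x => toLex (x.1, x.2)) false := by
    show List.foldl (fun acc x => PySem.List.insertBy
        (fun a b => decide (a.1 < b.1) || !decide (b.1 < a.1) && decide (a.2 < b.2)) x acc) [] xs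
      = List.foldl (fun acc x => PySem.List.insertBy
        (fun a b => decide (toLex (a.1, a.2) < toLex (b.1, b.2))) x acc) [] xs
    rw [hfun]
  rw [hbridge]
  apply PySem.List.sorted_eq_of_perm_of_pairwise_lt xs ys _ hperm
  refine hp.imp ?_
  intro a b hab
  rw [Prod.Lex.toLex_lt_toLex]
  exact hab
theorem hkSeg (m : Nat) : ∀ (a S : Int) (p t : List (Int × Int)), 1 ≤ a → (m : Int) ≤ S - a →
    hkStepA^[m] (p, t, (a - 1, S + 1 - a)) =
      (p ++ (PySem.List.pyRange a (a + m) 1).map (fun x => (x, S - x)),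
       t ++ (PySem.List.pyRange a (a + m) 1).map (fun x => (x, S - x)),
       (a - 1 + m, S + 1 - a - m)) := by
  induction m with
  | zero =>
      intro a S p t _ _
      simp [PySem.List.pyRange_one_eq_nil (by omega : a + (0:Nat) ≤ a)]
  | succ m ih =>
      intro a S p t ha hm
      rw [Function.iterate_succ_apply]
      have hne : ¬ (S + 1 - a = 1) := by push_cast at hm; omega
      have hstep : hkStepA (p, t, (a - 1, S + 1 - a)) =
          (p ++ [(a, S - a)], t ++ [(a, S - a)], (a, S - a)) := by
        simp only [hkStepA, hne, if_neg, reduceIte]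
        have e1 : a - 1 + 1 = a := by ring
        have e2 : S + 1 - a - 1 = S - a := by ring
        rw [e1, e2]
      rw [hstep]
      have hrec := ih (a + 1) S (p ++ [(a, S - a)]) (t ++ [(a, S - a)]) (by omega)
        (by push_cast at hm ⊢; omega)
      rw [show (a : Int) + 1 - 1 = a from by ring,
        show (S : Int) + 1 - (a + 1) = S - a from by ring] at hrec
      rw [hrec]
      have hsplit : PySem.List.pyRange a (a + ((m : Int) + 1)) 1 =
          a :: PySem.List.pyRange (a + 1) (a + 1 + m) 1 := by
        rw [PySem.List.pyRange_one_cons (by omega)]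
        congr 1
        ring
      push_cast
      rw [hsplit]
      simp only [List.map_cons, List.append_assoc, List.cons_append, List.nil_append,
        Prod.mk.injEq]
      refine ⟨trivial, trivial, by push_cast; ring_nf, by push_cast; ring_nf⟩

theorem hkOpen (L k : Int) (p t : List (Int × Int)) (hL : 1 ≤ L) (hk1 : 1 ≤ k)
    (hk2 : k ≤ L + 1) :
    hkStepA^[k.toNat] (p, t, (L, 1)) =
      (p ++ ((0 : Int), 2 * (L + 1) - 1) :: pdiag L k,
       t ++ ((0 : Int), 2 * (L + 1)) :: pdiag L k, (k, L + 2 - k)) := by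
  have hk : k.toNat = (k - 1).toNat + 1 := by omega
  rw [hk, Function.iterate_succ_apply]
  have hstep : hkStepA (p, t, (L, 1)) =
      (p ++ [(0, (L + 1) * 2 - 1)] ++ [(1, L + 1)],
       t ++ [(0, (L + 1) * 2)] ++ [(1, L + 1)], (1, L + 1)) := by
    simp [hkStepA]
  rw [hstep]
  have hrec := hkSeg (k - 1).toNat 2 (L + 2)
    (p ++ [(0, (L + 1) * 2 - 1)] ++ [(1, L + 1)])
    (t ++ [(0, (L + 1) * 2)] ++ [(1, L + 1)]) (by omega) (by omega)
  rw [show (2 : Int) - 1 = 1 from by norm_num,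
    show (L : Int) + 2 + 1 - 2 = L + 1 from by ring] at hrec
  rw [hrec]
  have hdiag : pdiag L k = (1, L + 1) :: (PySem.List.pyRange 2 (2 + ((k-1).toNat : Int)) 1).map
      (fun x => (x, L + 2 - x)) := by
    unfold pdiag
    rw [PySem.List.pyRange_one_cons (by omega : (1:Int) < k + 1)]
    rw [show (2 : Int) + ((k-1).toNat : Int) = k + 1 from by omega]
    simp only [List.map_cons]
    ring_nf
  rw [hdiag]
  simp only [List.append_assoc, List.cons_append, List.nil_append, Prod.mk.injEq]
  refine ⟨by rw [mul_comm], by rw [mul_comm], by omega, by omega⟩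

theorem hkAFull (LN : Nat) :
    hkStepA^[(hkTri ((LN : Int) + 1) - 1).toNat]
        ([(0, 1), (1, 1)], [(0, 2), (1, 1)], (1, 1)) =
      ([(0, 1), (1, 1)] ++ ablock ((LN : Int) + 1) (fun l => 2 * l - 1),
       [(0, 2), (1, 1)] ++ ablock ((LN : Int) + 1) (fun l => 2 * l),
       ((LN : Int) + 1, 1)) := by
  induction LN with
  | zero =>
      have h1 : hkTri 1 = 1 := by decide
      rw [show ((0:Nat):Int) + 1 = 1 from by norm_num, h1]
      simp [ablock, PySem.List.pyRange_one_eq_nil (by norm_num : (2:Int) ≥ 1 + 1)]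
  | succ LN ih =>
      have hL : ((LN:Nat).succ : Int) = (LN : Int) + 1 := by push_cast; ring
      have hs := hkTri_succ ((LN : Int) + 1)
      have hge := hkTri_ge ((LN : Int) + 1) (by omega)
      have hsplit : (hkTri ((LN : Int) + 1 + 1) - 1).toNat =
          ((LN : Int) + 2).toNat + (hkTri ((LN : Int) + 1) - 1).toNat := by omega
      have e : (LN : Int) + 1 + 1 = (LN : Int) + 2 := by ring
      rw [hL, e, ← e, hsplit, Function.iterate_add_apply, ih]
      rw [hkOpen ((LN : Int) + 1) ((LN : Int) + 2) _ _ (by omega) (by omega) (by omega)]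
      have hab : ∀ z : Int → Int, ablock ((LN : Int) + 1 + 1) z =
          ablock ((LN : Int) + 1) z ++
            ((0 : Int), z ((LN : Int) + 2)) :: pdiag ((LN : Int) + 1) ((LN : Int) + 2) := by
        intro z
        unfold ablock
        rw [show (LN : Int) + 1 + 1 + 1 = ((LN : Int) + 1 + 1) + 1 from by ring,
          PySem.List.pyRange_one_succ_right (by omega), List.flatMap_append]
        rw [e]
        simp only [List.flatMap_cons, List.flatMap_nil, List.append_nil]
        rw [show (LN : Int) + 2 - 1 = (LN : Int) + 1 from by ring]
      rw [hab, hab]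
      simp only [List.append_assoc, List.cons_append, List.nil_append, Prod.mk.injEq]
      refine ⟨by ring_nf, by ring_nf, by ring, by omega⟩

theorem hkAState (LN : Nat) (k : Int) (hk0 : 0 ≤ k) (hk1 : k ≤ (LN : Int) + 1) :
    hkStepA^[(hkTri ((LN : Int) + 1) - 1).toNat + k.toNat]
        ([(0, 1), (1, 1)], [(0, 2), (1, 1)], (1, 1)) =
      (aList ((LN : Int) + 1) k (fun l => 2 * l - 1),
       aList ((LN : Int) + 1) k (fun l => 2 * l),
       (if 0 < k then (k, (LN : Int) + 3 - k) else ((LN : Int) + 1, 1))) := by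
  by_cases hk : 0 < k
  · rw [show (hkTri ((LN : Int) + 1) - 1).toNat + k.toNat =
        k.toNat + (hkTri ((LN : Int) + 1) - 1).toNat from by omega,
      Function.iterate_add_apply, hkAFull]
    rw [hkOpen ((LN : Int) + 1) k _ _ (by omega) (by omega) (by omega)]
    unfold aList
    rw [if_pos hk, if_pos hk]
    simp only [List.append_assoc, List.cons_append, List.nil_append, Prod.mk.injEq]
    refine ⟨by norm_num, by norm_num, by rw [if_pos hk, show (LN : Int) + 1 + 2 = (LN : Int) + 3 from by ring]⟩
  · have : k.toNat = 0 := by omega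
    rw [this, Nat.add_zero, hkAFull]
    unfold aList
    rw [if_neg hk, if_neg hk, if_neg hk]
    simp
theorem extras_eq (L k : Int) (h0 : 0 ≤ k) (hk : k ≤ L) :
    (PySem.List.pyRange 1 (L + 1) 1).flatMap
        (fun a => if a ≤ k then [(a, L + 2 - a)] else []) = pdiag L k := by
  rw [PySem.List.pyRange_one_append 1 (k + 1) (L + 1) (by omega) (by omega),
    List.flatMap_append]
  have h1 : (PySem.List.pyRange 1 (k + 1) 1).flatMap
      (fun a => if a ≤ k then [(a, L + 2 - a)] else []) = pdiag L k := by
    rw [List.flatMap_congr (g := fun a => [(a, L + 2 - a)]) ?_]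
    · unfold pdiag
      exact (List.map_eq_flatMap).symm
    · intro a ha
      rw [PySem.List.mem_pyRange_one] at ha
      rw [if_pos (by omega)]
  have h2 : (PySem.List.pyRange (k + 1) (L + 1) 1).flatMap
      (fun a => if a ≤ k then [(a, L + 2 - a)] else []) = [] := by
    rw [List.flatMap_congr (g := fun _ => []) ?_]
    · simp
    · intro a ha
      rw [PySem.List.mem_pyRange_one] at ha
      rw [if_neg (by omega)]
  rw [h1, h2, List.append_nil]

theorem coe_flatMap_append (xs : List Int) (f g : Int → List (Int × Int)) :
    ((xs.flatMap (fun a => f a ++ g a) : List (Int × Int)) : Multiset (Int × Int)) =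
      ↑(xs.flatMap f) + ↑(xs.flatMap g) := by
  rw [show (↑(xs.flatMap f) + ↑(xs.flatMap g) : Multiset (Int × Int)) =
      ↑(xs.flatMap f ++ xs.flatMap g) from (Multiset.coe_add _ _).symm]
  exact Multiset.coe_eq_coe.mpr (List.flatMap_append_perm xs f g).symm

theorem stair_perm (LN : Nat) :
    (((PySem.List.pyRange 1 ((LN : Int) + 2) 1).flatMap
        (fun a => (PySem.List.pyRange 1 ((LN : Int) + 3 - a) 1).map (fun b => (a, b)))
       : List (Int × Int)) : Multiset (Int × Int)) =
    (((PySem.List.pyRange 1 ((LN : Int) + 2) 1).flatMap (fun l => pdiag (l - 1) l)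
       : List (Int × Int)) : Multiset (Int × Int)) := by
  induction LN with
  | zero =>
      norm_num
      decide
  | succ LN ih =>
      have hc : ((LN.succ : Nat) : Int) = (LN : Int) + 1 := by push_cast; ring
      rw [hc]
      have e2 : (LN : Int) + 1 + 2 = ((LN : Int) + 2) + 1 := by ring
      rw [e2, PySem.List.pyRange_one_succ_right (by omega), List.flatMap_append,
        List.flatMap_append]
      have hrow : (PySem.List.pyRange 1 ((LN : Int) + 2) 1).flatMap
          (fun a => (PySem.List.pyRange 1 ((LN : Int) + 1 + 3 - a) 1).map (fun b => (a, b))) =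
        (PySem.List.pyRange 1 ((LN : Int) + 2) 1).flatMap
          (fun a => (PySem.List.pyRange 1 ((LN : Int) + 3 - a) 1).map (fun b => (a, b)) ++
            [(a, (LN : Int) + 3 - a)]) := by
        apply List.flatMap_congr
        intro a ha
        rw [PySem.List.mem_pyRange_one] at ha
        rw [show (LN : Int) + 1 + 3 - a = ((LN : Int) + 3 - a) + 1 from by ring,
          PySem.List.pyRange_one_succ_right (by omega), List.map_append]
        simp
      rw [hrow]
      have hlast : (PySem.List.pyRange 1 ((LN : Int) + 1 + 3 - ((LN : Int) + 2)) 1).map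
          (fun b => (((LN : Int) + 2), b)) = [(((LN : Int) + 2), (1 : Int))] := by
        rw [show (LN : Int) + 1 + 3 - ((LN : Int) + 2) = 1 + 1 from by ring,
          PySem.List.pyRange_one_singleton]
        simp
      have hpd : pdiag ((LN : Int) + 2 - 1) ((LN : Int) + 2) =
          (PySem.List.pyRange 1 ((LN : Int) + 2) 1).map (fun a => (a, (LN : Int) + 3 - a)) ++
            [(((LN : Int) + 2), (1 : Int))] := by
        unfold pdiag
        rw [show (LN : Int) + 2 + 1 = ((LN : Int) + 2) + 1 from by ring,
          PySem.List.pyRange_one_succ_right (by omega), List.map_append]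
        congr 1
        · apply List.map_congr_left
          intro a ha
          rw [PySem.List.mem_pyRange_one] at ha
          rw [show (LN : Int) + 2 - 1 + 2 - a = (LN : Int) + 3 - a from by ring]
        · simp only [List.map_cons, List.map_nil]
          rw [show (LN : Int) + 2 - 1 + 2 - ((LN : Int) + 2) = 1 from by ring]
      rw [List.flatMap_singleton, List.flatMap_singleton, hlast, hpd]
      rw [← Multiset.coe_add, ← Multiset.coe_add, coe_flatMap_append, ih,
        ← List.map_eq_flatMap, ← Multiset.coe_add]
      abel

theorem coe_cons (a : Int × Int) (l : List (Int × Int)) :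
    ((a :: l : List (Int × Int)) : Multiset (Int × Int)) = {a} + ↑l := by
  rw [← Multiset.cons_coe, ← Multiset.singleton_add]

-- rowsB decomposed into the full staircase plus the if-extras
theorem rowsB_eq (L k : Int) (hL : 1 ≤ L) :
    rowsB L k = (PySem.List.pyRange 1 (L + 1) 1).flatMap
      (fun a => (PySem.List.pyRange 1 (L + 2 - a) 1).map (fun b => (a, b)) ++
        (if a ≤ k then [(a, L + 2 - a)] else [])) := by
  unfold rowsB
  apply List.flatMap_congr
  intro a ha
  rw [PySem.List.mem_pyRange_one] at ha
  by_cases h : a ≤ k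
  · rw [if_pos h, if_pos h,
      show L + 2 - a + 1 = (L + 2 - a) + 1 from by ring,
      PySem.List.pyRange_one_succ_right (by omega), List.map_append]
    simp
  · rw [if_neg h, if_neg h]
    simp

-- the ablock, with its zeros split off, as a multiset
theorem coe_ablock (L : Int) (z : Int → Int) :
    ((ablock L z : List (Int × Int)) : Multiset (Int × Int)) =
      ↑((PySem.List.pyRange 2 (L + 1) 1).map (fun l => ((0 : Int), z l))) +
      ↑((PySem.List.pyRange 2 (L + 1) 1).flatMap (fun l => pdiag (l - 1) l)) := by
  unfold ablock
  have h := coe_flatMap_append (PySem.List.pyRange 2 (L + 1) 1)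
    (fun l => [((0 : Int), z l)]) (fun l => pdiag (l - 1) l)
  exact h.trans (by rw [← List.map_eq_flatMap])

theorem stair_perm' (LN : Nat) :
    (((PySem.List.pyRange 1 (((LN : Int) + 1) + 1) 1).flatMap
        (fun a => (PySem.List.pyRange 1 (((LN : Int) + 1) + 2 - a) 1).map (fun b => (a, b)))
       : List (Int × Int)) : Multiset (Int × Int)) =
    (((PySem.List.pyRange 1 (((LN : Int) + 1) + 1) 1).flatMap (fun l => pdiag (l - 1) l)
       : List (Int × Int)) : Multiset (Int × Int)) := by
  have h := stair_perm LN
  rw [show (LN : Int) + 1 + 1 = (LN : Int) + 2 from by ring,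
    show (fun a => (PySem.List.pyRange 1 ((LN : Int) + 1 + 2 - a) 1).map
        (fun b => ((a : Int), b))) =
      (fun a => (PySem.List.pyRange 1 ((LN : Int) + 3 - a) 1).map (fun b => (a, b))) from by
      funext a
      rw [show (LN : Int) + 1 + 2 - a = (LN : Int) + 3 - a from by ring]]
  exact h

theorem perm_B_A (z : Int → Int) (LN : Nat) (k : Int) (hk0 : 0 ≤ k)
    (hk1 : k ≤ (LN : Int) + 1) :
    (zCol z (if 0 < k then (LN : Int) + 2 else (LN : Int) + 1) ++
        rowsB ((LN : Int) + 1) k).Perm (aList ((LN : Int) + 1) k z) := by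
  apply Multiset.coe_eq_coe.mp
  unfold aList
  rw [rowsB_eq _ k (by omega), ← Multiset.coe_add, coe_flatMap_append,
    extras_eq _ k (by omega) (by omega), stair_perm']
  rw [PySem.List.pyRange_one_cons (by omega : (1 : Int) < (LN : Int) + 1 + 1),
    List.flatMap_cons,
    show (1 : Int) + 1 = 2 from by norm_num,
    show pdiag (1 - 1) 1 = [((1 : Int), (1 : Int))] from by decide]
  rw [← Multiset.coe_add, ← Multiset.coe_add, ← Multiset.coe_add, coe_ablock, coe_cons]
  by_cases hk : 0 < k
  · rw [if_pos hk, if_pos hk]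
    unfold zCol
    rw [PySem.List.pyRange_one_succ_right (by omega : (1 : Int) ≤ (LN : Int) + 2),
      PySem.List.pyRange_one_cons (by omega : (1 : Int) < (LN : Int) + 2),
      show (1 : Int) + 1 = 2 from by norm_num]
    simp only [List.map_append, List.map_cons, List.map_nil]
    rw [coe_cons, ← Multiset.coe_add, coe_cons, coe_cons, coe_cons]
    simp only [show (LN : Int) + 1 + 1 = (LN : Int) + 2 from by ring]
    rw [coe_cons]
    simp only [Multiset.coe_nil]
    generalize ((List.flatMap (fun l => pdiag (l - 1) l)
      (PySem.List.pyRange 2 ((LN : Int) + 2)) : List (Int × Int)) : Multiset (Int × Int)) = M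
    abel
  · have hkz : k = 0 := by omega
    subst hkz
    rw [if_neg hk, if_neg hk]
    unfold zCol
    rw [PySem.List.pyRange_one_cons (by omega : (1 : Int) < (LN : Int) + 1 + 1),
      show (1 : Int) + 1 = 2 from by norm_num]
    simp only [List.map_cons]
    rw [coe_cons, coe_cons, coe_cons,
      show pdiag ((LN : Int) + 1) 0 = [] from by
        simp [pdiag, PySem.List.pyRange_one_eq_nil]]
    simp only [show (LN : Int) + 1 + 1 = (LN : Int) + 2 from by ring]
    abel

theorem pairwise_B (z : Int → Int) (hz : ∀ a b : Int, a < b → z a < z b) (L k top : Int)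
    (htop : 0 ≤ top) :
    (zCol z top ++ rowsB L k).Pairwise hkLt := by
  rw [List.pairwise_append]
  refine ⟨?_, ?_, ?_⟩
  · unfold zCol
    rw [List.pairwise_map]
    exact (PySem.List.pairwise_lt_pyRange_one 1 (top + 1)).imp
      (fun h => Or.inr ⟨rfl, hz _ _ h⟩)
  · unfold rowsB
    rw [List.pairwise_flatMap]
    constructor
    · intro a _
      rw [List.pairwise_map]
      exact (PySem.List.pairwise_lt_pyRange_one _ _).imp (fun h => Or.inr ⟨rfl, h⟩)
    · refine (PySem.List.pairwise_lt_pyRange_one _ _).imp ?_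
      intro a1 a2 h x hx y hy
      rw [List.mem_map] at hx hy
      obtain ⟨b1, _, rfl⟩ := hx
      obtain ⟨b2, _, rfl⟩ := hy
      exact Or.inl h
  · intro x hx y hy
    unfold zCol at hx
    unfold rowsB at hy
    rw [List.mem_map] at hx
    obtain ⟨l, _, rfl⟩ := hx
    rw [List.mem_flatMap] at hy
    obtain ⟨a, ha, hy⟩ := hy
    rw [PySem.List.mem_pyRange_one] at ha
    rw [List.mem_map] at hy
    obtain ⟨b, _, rfl⟩ := hy
    exact Or.inl (by omega)

-- B's output, written with zCol/rowsB
theorem B_unfold (h n L k top : Int)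
    (hn : n = (if 1 < h then h - 1 else 0))
    (hL : L = hkFindL (n.toNat + 2) n 1)
    (hk : k = n - (hkTri L - 1))
    (htop : top = (if 0 < k then L + 1 else L)) :
    hk_modes_alt h =
      (zCol (fun l => 2 * l - 1) top ++ rowsB L k,
       zCol (fun l => 2 * l) top ++ rowsB L k) := by
  subst hn hL hk htop
  unfold hk_modes_alt hkTri zCol rowsB
  simp only []
  rw [foldl_row_append]

-- one component of the final equality
theorem component (z : Int → Int) (hz : ∀ a b : Int, a < b → z a < z b) (LN : Nat)
    (k : Int) (hk0 : 0 ≤ k) (hk1 : k ≤ (LN : Int) + 1) :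
    PySem.List.sorted2 (aList ((LN : Int) + 1) k z) (fun x => x.1) (fun x => x.2) false =
      zCol z (if 0 < k then (LN : Int) + 2 else (LN : Int) + 1) ++ rowsB ((LN : Int) + 1) k := by
  exact sorted2_eq_of_perm_of_pairwise _ _ (perm_B_A z LN k hk0 hk1)
    (pairwise_B z hz _ _ _ (by split_ifs <;> omega))

-- ===== VERDICT (by name: the statement is the Claim_ definition above) =====
theorem hk_modes_spec : Claim_equal_hk_modes := by
  intro h _
  unfold Spec_hk_modes
  have hn0 : (0 : Int) ≤ (if 1 < h then h - 1 else 0) := by split_ifs <;> omega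
  generalize hn : (if 1 < h then h - 1 else 0 : Int) = n at hn0
  have tri1 : hkTri 1 = 1 := by decide
  obtain ⟨hL1, hLlo, hLhi⟩ := hkFindL_spec (n.toNat + 2) n 1 (by norm_num) (by omega)
    (by push_cast; omega)
  generalize hLdef : hkFindL (n.toNat + 2) n 1 = L at hL1 hLlo hLhi
  have hsucc := hkTri_succ L
  have hge := hkTri_ge L hL1
  have hc : (((L - 1).toNat : Int)) + 1 = L := by omega
  have hc2 : (((L - 1).toNat : Int)) + 2 = L + 1 := by omega
  rw [B_unfold h n L (n - (hkTri L - 1)) (if 0 < n - (hkTri L - 1) then L + 1 else L)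
    hn.symm hLdef.symm rfl rfl]
  unfold hk_modes
  simp only []
  rw [foldl_const_iterate, PySem.List.length_pyRange_one]
  have hhn : (h - 1).toNat = n.toNat := by rw [← hn]; split_ifs <;> omega
  have hsplitn : n.toNat =
      (hkTri ((((L - 1).toNat : Int)) + 1) - 1).toNat + (n - (hkTri L - 1)).toNat := by
    rw [hc]; omega
  rw [hhn, hsplitn, hkAState ((L - 1).toNat) (n - (hkTri L - 1)) (by omega) (by omega)]
  simp only []
  rw [component (fun l => 2 * l - 1) (by intro a b hab; dsimp only; omega) ((L - 1).toNat) _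
      (by omega) (by omega),
    component (fun l => 2 * l) (by intro a b hab; dsimp only; omega) ((L - 1).toNat) _
      (by omega) (by omega),
    hc, hc2]
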